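-- pv_equiv track=rewrite | github.com/codsod/blog | 每周作业/asD/被5整除.py | erjin
-- ===== SOURCE A (Python) =====
-- def erjin(s):
--     n=len(s)
--     sum=0
--     pos=0
--     while s:
--         num = s.pop()
--         sum+=num*(2**pos)
--         pos+=1
--     if sum%5==0:
--         return True
--     else:
--         return False
-- ===== SOURCE B (Python) =====
-- def erjin(s):
--     # Note: A empties s in place via pop(); B does not mutate s.
--     # Equivalence claimed is about the return value only.
--     r = 0
--     for d in s:
--         r = (2 * r + d) % 5
--     return r == 0
-- ===== Notes on version B (the rewrite author's own statement) =====
-- stated objective: faster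
-- what changed: Replaces building the full big-integer value with per-digit 2**pos powers (and list.pop mutation) by a single left-to-right Horner pass keeping only the running remainder mod 5.
import Mathlib
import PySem

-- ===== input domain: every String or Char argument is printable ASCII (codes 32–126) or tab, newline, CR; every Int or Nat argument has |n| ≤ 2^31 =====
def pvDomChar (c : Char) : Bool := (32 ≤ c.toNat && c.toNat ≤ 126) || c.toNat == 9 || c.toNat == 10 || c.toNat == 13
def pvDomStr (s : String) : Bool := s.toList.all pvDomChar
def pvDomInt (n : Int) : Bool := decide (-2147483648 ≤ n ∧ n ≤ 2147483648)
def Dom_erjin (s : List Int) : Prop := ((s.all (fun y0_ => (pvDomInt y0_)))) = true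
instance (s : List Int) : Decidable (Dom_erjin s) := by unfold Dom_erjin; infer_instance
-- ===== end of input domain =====

-- B replaces A's big-integer build (pop from the end, growing powers of 2) by one
-- Horner pass keeping a running remainder mod 5; A empties s in place, B does not:
-- the equivalence proved is about the return value only.

-- ===== PORT A =====
-- A's while loop pops the LAST element each iteration; iterating over s.reverse
-- head-first visits elements in exactly that pop order.
-- Python '% 5' with the positive literal divisor 5 equals Lean's Int.emod '%' exactly.
def erjinLoop : List Int → Int → Nat → Int
  | [], sum, _ => sum
  | num :: rest, sum, pos => erjinLoop rest (sum + num * 2 ^ pos) (pos + 1)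

def erjin (s : List Int) : Bool :=
  let sum := erjinLoop s.reverse 0 0
  if sum % 5 == 0 then true else false

-- ===== PORT B =====
def erjin_alt (s : List Int) : Bool :=
  (s.foldl (fun r d => (2 * r + d) % 5) 0) == 0

-- ===== PRECONDITION & SPEC =====
def Spec_erjin (s : List Int) (out : Bool) : Prop := out = erjin_alt s
instance (s : List Int) (out : Bool) : Decidable (Spec_erjin s out) := by unfold Spec_erjin; infer_instance

-- ===== CLAIM (what is proved, stated in full; the proofs are below) =====
def Claim_equal_erjin : Prop := ∀ (s : List Int), Dom_erjin s → Spec_erjin s (erjin s)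

-- ===== LEMMAS AND PROOFS =====

-- value of a digit list read little-endian (the order A pops in)
def pSum : List Int → Int
  | [] => 0
  | d :: t => d + 2 * pSum t

theorem erjinLoop_eq (l : List Int) : ∀ (sum : Int) (pos : Nat),
    erjinLoop l sum pos = sum + pSum l * 2 ^ pos := by
  induction l with
  | nil => intro sum pos; simp [erjinLoop, pSum]
  | cons d t ih =>
      intro sum pos
      simp only [erjinLoop, pSum, ih]
      ring

theorem pSum_append (l : List Int) (a : Int) :
    pSum (l ++ [a]) = pSum l + a * 2 ^ l.length := by
  induction l with
  | nil => simp [pSum]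
  | cons d t ih => simp [pSum, ih]; ring

theorem horner_eq (s : List Int) : ∀ (acc : Int),
    s.foldl (fun a d => 2 * a + d) acc = acc * 2 ^ s.length + pSum s.reverse := by
  induction s with
  | nil => intro acc; simp [pSum]
  | cons a t ih =>
      intro acc
      simp only [List.foldl_cons, ih, List.reverse_cons, pSum_append,
        List.length_reverse, List.length_cons]
      ring

theorem mod_fold_eq (s : List Int) : ∀ (x : Int),
    s.foldl (fun r d => (2 * r + d) % 5) (x % 5)
      = (s.foldl (fun a d => 2 * a + d) x) % 5 := by
  induction s with
  | nil => intro x; simp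
  | cons d t ih =>
      intro x
      have h : (2 * (x % 5) + d) % 5 = (2 * x + d) % 5 := by omega
      simp only [List.foldl_cons, h, ih]

-- ===== VERDICT (by name: the statement is the Claim_ definition above) =====
theorem erjin_spec : Claim_equal_erjin := by
  intro s _
  show erjin s = erjin_alt s
  have hb : (s.foldl (fun r d => (2 * r + d) % 5) 0)
      = pSum s.reverse % 5 := by
    have := mod_fold_eq s 0
    simpa [horner_eq s 0] using this
  simp only [erjin, erjin_alt, erjinLoop_eq, hb]
  have h5 : (0:Int) + pSum s.reverse * 2 ^ 0 = pSum s.reverse := by ring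
  rw [h5]
  by_cases h : pSum s.reverse % 5 = 0 <;> simp [h]
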